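-- pv_equiv track=rewrite | github.com/Vyky29/PORTALVIC | database/build_machine_exports.py | merge_term_staff_weekday_maps
-- ===== SOURCE A (Python) =====
-- def merge_term_staff_weekday_maps(tt: dict, roster: dict) -> dict:
--     keys = set(tt) | set(roster)
--     out = {}
--     for k in sorted(keys):
--         s = set(tt.get(k) or []) | set(roster.get(k) or [])
--         if s:
--             out[k] = sorted(s)
--     return out
-- ===== SOURCE B (Python) =====
-- def merge_term_staff_weekday_maps(tt: dict, roster: dict) -> dict:
--     pairs = sorted({(k, d) for src in (tt, roster) for k, v in src.items() for d in (v or [])})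
--     out = {}
--     for k, d in pairs:
--         out.setdefault(k, []).append(d)
--     return out
-- ===== Notes on version B (the rewrite author's own statement) =====
-- stated objective: alternative
-- what changed: B flattens both dicts into one deduplicated set of (key, day) pairs, sorts those pairs lexicographically once, and groups the consecutive runs into the result dict, instead of A's loop over the sorted union of the key sets with two lookups, a per-key set union and a per-key sort.
import Mathlib
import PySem

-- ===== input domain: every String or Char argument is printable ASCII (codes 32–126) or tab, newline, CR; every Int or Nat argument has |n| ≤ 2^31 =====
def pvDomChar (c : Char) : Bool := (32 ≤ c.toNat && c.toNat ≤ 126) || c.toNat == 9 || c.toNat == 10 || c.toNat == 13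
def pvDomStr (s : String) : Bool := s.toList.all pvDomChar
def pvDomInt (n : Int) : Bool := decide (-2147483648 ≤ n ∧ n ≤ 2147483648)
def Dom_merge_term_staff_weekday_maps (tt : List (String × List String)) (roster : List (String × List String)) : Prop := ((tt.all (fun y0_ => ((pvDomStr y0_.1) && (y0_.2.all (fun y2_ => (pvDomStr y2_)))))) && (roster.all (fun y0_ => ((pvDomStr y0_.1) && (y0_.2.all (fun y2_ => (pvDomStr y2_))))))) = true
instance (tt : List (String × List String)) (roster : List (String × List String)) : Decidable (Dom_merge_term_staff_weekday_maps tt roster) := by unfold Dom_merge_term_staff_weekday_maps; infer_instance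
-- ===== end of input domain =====

-- B flattens both dicts into one deduplicated sorted list of (key, day) pairs and groups the
-- consecutive runs, instead of A's loop over the sorted key-set union (objective: alternative).

-- ===== PORT A =====
-- keys = set(tt) | set(roster); for k in sorted(keys): s = set(tt.get(k) or []) | set(roster.get(k) or []); if s: out[k] = sorted(s)
def merge_term_staff_weekday_maps (tt : List (String × List String)) (roster : List (String × List String)) : List (String × List String) :=
  let keys : PySem.Set String :=
    PySem.Set.union (PySem.Set.ofList (tt.map Prod.fst)) (roster.map Prod.fst)
  (PySem.List.sorted keys (fun k => k) false).foldl
    (fun out k =>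
      -- `tt.get(k) or []`: a missing key gives None, which `or` turns into [] — getD k [];
      -- on a present value v : List String, `v or []` is v itself ([] or [] = [])
      let s : PySem.Set String :=
        PySem.Set.union (PySem.Set.ofList ((PySem.Dict.mk tt).getD k []))
          ((PySem.Dict.mk roster).getD k [])
      if s ≠ [] then out ++ [(k, PySem.List.sorted s (fun x => x) false)] else out)
    []

-- ===== PORT B =====
-- pairs = sorted({(k, d) for src in (tt, roster) for k, v in src.items() for d in (v or [])});
-- out = {}; for k, d in pairs: out.setdefault(k, []).append(d); return out
-- ((v or []) iterates exactly v when v is a list, the only value shape of this Lean type)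
def merge_term_staff_weekday_maps_alt (tt : List (String × List String)) (roster : List (String × List String)) : List (String × List String) :=
  let pairs : PySem.Set (String × String) :=
    PySem.Set.ofList ((tt ++ roster).flatMap (fun kv => kv.2.map (fun d => (kv.1, d))))
  -- sorted(pairs): Python sorts the 2-tuples lexicographically
  let sortedPairs := PySem.List.sorted2 pairs Prod.fst Prod.snd false
  -- out.setdefault(k, []).append(d) mutates out[k]: dict.modify with default []
  (sortedPairs.foldl (fun d p => d.modify p.1 [] (fun l => l ++ [p.2]))
    (PySem.Dict.empty : PySem.Dict String (List String))).items

-- ===== PRECONDITION & SPEC =====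
-- Pre_ excludes association lists with duplicate keys: a Python dict cannot hold two bindings of
-- the same key, so such lists represent no input of the Python programs (no Python input is excluded).
def Pre_merge_term_staff_weekday_maps (tt : List (String × List String)) (roster : List (String × List String)) : Prop :=
  (tt.map Prod.fst).Nodup ∧ (roster.map Prod.fst).Nodup
instance (tt : List (String × List String)) (roster : List (String × List String)) : Decidable (Pre_merge_term_staff_weekday_maps tt roster) := by unfold Pre_merge_term_staff_weekday_maps; infer_instance

def pvWitness_merge_term_staff_weekday_maps : (List (String × List String)) × (List (String × List String)) :=
  ([("t1", ["mon", "tue"]), ("t2", [])], [("t1", ["wed"]), ("t3", ["fri"])])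

def Spec_merge_term_staff_weekday_maps (tt : List (String × List String)) (roster : List (String × List String)) (out : List (String × List String)) : Prop := out = merge_term_staff_weekday_maps_alt tt roster
instance (tt : List (String × List String)) (roster : List (String × List String)) (out : List (String × List String)) : Decidable (Spec_merge_term_staff_weekday_maps tt roster out) := by unfold Spec_merge_term_staff_weekday_maps; infer_instance

-- ===== CLAIM (what is proved, stated in full; the proofs are below) =====
def Claim_equal_merge_term_staff_weekday_maps : Prop := ∀ (tt : List (String × List String)) (roster : List (String × List String)), Dom_merge_term_staff_weekday_maps tt roster → Pre_merge_term_staff_weekday_maps tt roster → Spec_merge_term_staff_weekday_maps tt roster (merge_term_staff_weekday_maps tt roster)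

-- ===== LEMMAS AND PROOFS =====

-- the flattened (key, day) pair list B starts from
def pvPairsAll (tt roster : List (String × List String)) : List (String × String) :=
  (tt ++ roster).flatMap (fun kv => kv.2.map (fun d => (kv.1, d)))

-- A's per-key union set
def pvF (tt roster : List (String × List String)) (k : String) : PySem.Set String :=
  PySem.Set.union (PySem.Set.ofList ((PySem.Dict.mk tt).getD k []))
    ((PySem.Dict.mk roster).getD k [])

-- B's one sort of tuples: the lexicographic order on pairs as a single sort key
def pvSorted (tt roster : List (String × List String)) : List (String × String) :=
  PySem.List.sorted (PySem.Set.ofList (pvPairsAll tt roster)) (fun p => toLex p) false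

-- sorted2 with fst/snd keys IS sorting by the lexicographic order on the pair
lemma sorted2_eq_sorted_lex (xs : List (String × String)) :
    PySem.List.sorted2 xs Prod.fst Prod.snd false
      = PySem.List.sorted xs (fun p => toLex p) false := by
  have hbef : (fun (a b : String × String) =>
      decide (a.1 < b.1) || (!decide (b.1 < a.1) && decide (a.2 < b.2)))
      = (fun (a b : String × String) => decide (toLex a < toLex b)) := by
    funext a b
    simp only [Prod.Lex.toLex_lt_toLex]
    by_cases h1 : a.1 < b.1
    · simp [h1]
    · by_cases h2 : b.1 < a.1
      · have hne : a.1 ≠ b.1 := ne_of_gt h2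
        simp [h1, h2, hne]
      · have heq : a.1 = b.1 := le_antisymm (not_lt.mp h2) (not_lt.mp h1)
        simp [heq]
  show List.foldl (fun acc x => PySem.List.insertBy (fun a b =>
      decide (a.1 < b.1) || (!decide (b.1 < a.1) && decide (a.2 < b.2))) x acc) [] xs
    = List.foldl (fun acc x => PySem.List.insertBy (fun a b => decide (toLex a < toLex b)) x acc) [] xs
  rw [hbef]

-- Set.ofList keeps a subsequence of its input
lemma foldl_add_sublist {α : Type} [BEq α] (xs s : List α) :
    ∃ t, xs.foldl PySem.Set.add s = s ++ t ∧ t.Sublist xs := by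
  induction xs generalizing s with
  | nil => exact ⟨[], by simp, List.Sublist.refl []⟩
  | cons x xs ih =>
    rw [List.foldl_cons]
    obtain ⟨t, h1, h2⟩ := ih (PySem.Set.add s x)
    have hadd : PySem.Set.add s x = s ∨ PySem.Set.add s x = s ++ [x] := by
      unfold PySem.Set.add; split_ifs <;> simp
    rcases hadd with ha | ha
    · exact ⟨t, by rw [h1, ha], h2.cons x⟩
    · exact ⟨x :: t, by rw [h1, ha]; simp, h2.cons₂ x⟩

lemma ofList_sublist {α : Type} [BEq α] (xs : List α) :
    (PySem.Set.ofList xs).Sublist xs := by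
  obtain ⟨t, h1, h2⟩ := foldl_add_sublist xs []
  have : PySem.Set.ofList xs = xs.foldl PySem.Set.add [] := rfl
  rw [this, h1, List.nil_append]
  exact h2

-- membership in an assoc-list lookup, for unique keys
lemma mem_getD_iff (l : List (String × List String)) (h : (l.map Prod.fst).Nodup)
    (k : String) (d : String) :
    d ∈ (PySem.Dict.mk l).getD k [] ↔ ∃ v, (k, v) ∈ l ∧ d ∈ v := by
  induction l with
  | nil =>
    have hnone : (PySem.Dict.mk ([] : List (String × List String))).get? k = none := rfl
    rw [PySem.Dict.getD_eq_get?_getD, hnone]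
    simp
  | cons p rest ih =>
    obtain ⟨a, b⟩ := p
    simp only [List.map_cons, List.nodup_cons] at h
    rw [PySem.Dict.getD_eq_get?_getD, PySem.Dict.get?_mk_cons]
    by_cases hk : a = k
    · subst hk
      simp only [beq_self_eq_true, if_pos, Option.getD_some]
      constructor
      · intro hd; exact ⟨b, List.mem_cons_self .., hd⟩
      · rintro ⟨v, hv, hd⟩
        rcases List.mem_cons.mp hv with he | hm
        · cases he; exact hd
        · exact absurd (List.mem_map.mpr ⟨(a, v), hm, rfl⟩) h.1
    · have : (a == k) = false := beq_eq_false_iff_ne.mpr hk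
      rw [this]
      simp only [Bool.false_eq_true, if_neg, not_false_iff]
      rw [← PySem.Dict.getD_eq_get?_getD]
      rw [ih h.2]
      constructor
      · rintro ⟨v, hv, hd⟩; exact ⟨v, List.mem_cons_of_mem _ hv, hd⟩
      · rintro ⟨v, hv, hd⟩
        rcases List.mem_cons.mp hv with he | hm
        · cases he; exact absurd rfl hk
        · exact ⟨v, hm, hd⟩

lemma mem_pairsAll (tt roster : List (String × List String)) (k d : String) :
    (k, d) ∈ pvPairsAll tt roster
      ↔ (∃ v, (k, v) ∈ tt ∧ d ∈ v) ∨ (∃ v, (k, v) ∈ roster ∧ d ∈ v) := by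
  simp only [pvPairsAll, List.mem_flatMap, List.mem_append, List.mem_map, Prod.mk.injEq]
  constructor
  · rintro ⟨⟨a, b⟩, hab, d', hd', h1, h2⟩
    subst h1; subst h2
    rcases hab with h | h
    · exact Or.inl ⟨b, h, hd'⟩
    · exact Or.inr ⟨b, h, hd'⟩
  · rintro (⟨v, hv, hd⟩ | ⟨v, hv, hd⟩)
    · exact ⟨(k, v), Or.inl hv, d, hd, rfl, rfl⟩
    · exact ⟨(k, v), Or.inr hv, d, hd, rfl, rfl⟩

lemma mem_F (tt roster : List (String × List String))
    (ht : (tt.map Prod.fst).Nodup) (hr : (roster.map Prod.fst).Nodup) (k d : String) :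
    d ∈ pvF tt roster k ↔ (k, d) ∈ pvPairsAll tt roster := by
  rw [pvF, PySem.Set.mem_union, PySem.Set.mem_ofList, mem_pairsAll,
    mem_getD_iff tt ht, mem_getD_iff roster hr]

lemma nodup_F (tt roster : List (String × List String)) (k : String) :
    (pvF tt roster k).Nodup :=
  PySem.Set.nodup_union _ _ (PySem.Set.nodup_ofList _)

lemma pvSorted_perm (tt roster : List (String × List String)) :
    (pvSorted tt roster).Perm (PySem.Set.ofList (pvPairsAll tt roster)) :=
  PySem.List.sorted_perm _ _ _

lemma pvSorted_nodup (tt roster : List (String × List String)) :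
    (pvSorted tt roster).Nodup :=
  (pvSorted_perm tt roster).symm.nodup (PySem.Set.nodup_ofList _)

lemma mem_pvSorted (tt roster : List (String × List String)) (p : String × String) :
    p ∈ pvSorted tt roster ↔ p ∈ pvPairsAll tt roster := by
  rw [(pvSorted_perm tt roster).mem_iff, PySem.Set.mem_ofList]

lemma pvSorted_pairwise_lt (tt roster : List (String × List String)) :
    (pvSorted tt roster).Pairwise (fun a b => toLex a < toLex b) := by
  have hle : (pvSorted tt roster).Pairwise (fun a b => toLex a ≤ toLex b) :=
    PySem.List.sorted_pairwise _ _
  have hnd : (pvSorted tt roster).Pairwise (fun a b => a ≠ b) := pvSorted_nodup tt roster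
  exact (hle.and hnd).imp (fun h =>
    lt_of_le_of_ne h.1 (fun he => h.2 (toLex.injective he)))

-- B's value at key k is exactly A's sorted per-key union
lemma values_eq (tt roster : List (String × List String))
    (ht : (tt.map Prod.fst).Nodup) (hr : (roster.map Prod.fst).Nodup) (k : String) :
    PySem.List.sorted (pvF tt roster k) (fun x => x) false
      = ((pvSorted tt roster).filter (fun p => p.1 == k)).map Prod.snd := by
  have hfsub : ((pvSorted tt roster).filter (fun p => p.1 == k)).Sublist (pvSorted tt roster) :=
    List.filter_sublist
  have hmemk : ∀ p ∈ (pvSorted tt roster).filter (fun p => p.1 == k), p.1 = k := by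
    intro p hp
    exact beq_iff_eq.mp (List.mem_filter.mp hp).2
  apply PySem.List.sorted_eq_of_perm_of_pairwise_lt
  · -- permutation
    have hnodupf : ((pvSorted tt roster).filter (fun p => p.1 == k)).Nodup :=
      (pvSorted_nodup tt roster).sublist hfsub
    have hnodupm : (((pvSorted tt roster).filter (fun p => p.1 == k)).map Prod.snd).Nodup := by
      refine List.Nodup.map_on ?_ hnodupf
      intro p hp q hq hpq
      have := hmemk p hp; have := hmemk q hq
      exact Prod.ext (by simp_all) hpq
    rw [List.perm_ext_iff_of_nodup hnodupm (nodup_F tt roster k)]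
    intro d
    rw [mem_F tt roster ht hr]
    constructor
    · intro hd
      obtain ⟨p, hp, hd2⟩ := List.mem_map.mp hd
      have h1 := hmemk p hp
      have hmem := List.mem_of_mem_filter hp
      rw [mem_pvSorted] at hmem
      have : p = (k, d) := Prod.ext h1 hd2
      rwa [this] at hmem
    · intro hd
      refine List.mem_map.mpr ⟨(k, d), ?_, rfl⟩
      refine List.mem_filter.mpr ⟨?_, by simp⟩
      rw [mem_pvSorted]; exact hd
  · -- strictly increasing
    have hpwf : ((pvSorted tt roster).filter (fun p => p.1 == k)).Pairwise
        (fun a b => toLex a < toLex b) :=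
      (pvSorted_pairwise_lt tt roster).sublist hfsub
    rw [List.pairwise_map]
    refine List.Pairwise.imp_of_mem ?_ hpwf
    intro a b ha hb hab
    rcases Prod.Lex.toLex_lt_toLex.mp hab with h | h
    · rw [hmemk a ha, hmemk b hb] at h; exact absurd h (lt_irrefl k)
    · exact h.2

-- B's key list is exactly A's sorted key union filtered to the nonempty groups
lemma keys_eq (tt roster : List (String × List String))
    (ht : (tt.map Prod.fst).Nodup) (hr : (roster.map Prod.fst).Nodup) :
    PySem.Set.ofList ((pvSorted tt roster).map Prod.fst)
      = (PySem.List.sorted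
          (PySem.Set.union (PySem.Set.ofList (tt.map Prod.fst)) (roster.map Prod.fst))
          (fun k => k) false).filter (fun k => decide (pvF tt roster k ≠ [])) := by
  have hkeys_nodup : (PySem.List.sorted
      (PySem.Set.union (PySem.Set.ofList (tt.map Prod.fst)) (roster.map Prod.fst))
      (fun k => k) false).Nodup :=
    (PySem.List.sorted_perm _ _ _).symm.nodup
      (PySem.Set.nodup_union _ _ (PySem.Set.nodup_ofList _))
  have hL_nodup : (PySem.Set.ofList ((pvSorted tt roster).map Prod.fst)).Nodup :=
    PySem.Set.nodup_ofList _
  have hR_nodup : ((PySem.List.sorted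
      (PySem.Set.union (PySem.Set.ofList (tt.map Prod.fst)) (roster.map Prod.fst))
      (fun k => k) false).filter (fun k => decide (pvF tt roster k ≠ []))).Nodup :=
    hkeys_nodup.sublist (List.filter_sublist)
  -- membership on each side is 'the merged group at k is nonempty'
  have hmemL : ∀ k, k ∈ PySem.Set.ofList ((pvSorted tt roster).map Prod.fst)
      ↔ pvF tt roster k ≠ [] := by
    intro k
    rw [PySem.Set.mem_ofList, List.mem_map]
    constructor
    · rintro ⟨p, hp, hk⟩
      rw [mem_pvSorted] at hp
      intro hnil
      have : p.2 ∈ pvF tt roster p.1 := by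
        rw [mem_F tt roster ht hr]; exact hp
      rw [hk, hnil] at this
      exact absurd this (List.not_mem_nil)
    · intro hne
      obtain ⟨d, hd⟩ := List.exists_mem_of_ne_nil _ hne
      rw [mem_F tt roster ht hr] at hd
      exact ⟨(k, d), by rw [mem_pvSorted]; exact hd, rfl⟩
  have hmemR : ∀ k, k ∈ (PySem.List.sorted
      (PySem.Set.union (PySem.Set.ofList (tt.map Prod.fst)) (roster.map Prod.fst))
      (fun k => k) false).filter (fun k => decide (pvF tt roster k ≠ []))
      ↔ pvF tt roster k ≠ [] := by
    intro k
    rw [List.mem_filter]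
    constructor
    · intro h; exact of_decide_eq_true h.2
    · intro hne
      refine ⟨?_, decide_eq_true hne⟩
      obtain ⟨d, hd⟩ := List.exists_mem_of_ne_nil _ hne
      rw [mem_F tt roster ht hr, mem_pairsAll] at hd
      rw [(PySem.List.sorted_perm _ _ _).mem_iff, PySem.Set.mem_union, PySem.Set.mem_ofList]
      rcases hd with ⟨v, hv, _⟩ | ⟨v, hv, _⟩
      · exact Or.inl (List.mem_map.mpr ⟨(k, v), hv, rfl⟩)
      · exact Or.inr (List.mem_map.mpr ⟨(k, v), hv, rfl⟩)
  refine PySem.List.eq_of_perm_of_pairwise_le_of_pairwise_lt (fun k => k) ?_ ?_ ?_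
  · rw [List.perm_ext_iff_of_nodup hL_nodup hR_nodup]
    intro k; rw [hmemL, hmemR]
  · -- weakly increasing on the left
    have h1 : ((pvSorted tt roster).map Prod.fst).Pairwise (fun a b => a ≤ b) := by
      rw [List.pairwise_map]
      refine (pvSorted_pairwise_lt tt roster).imp ?_
      intro a b hab
      rcases Prod.Lex.toLex_lt_toLex.mp hab with h | h
      · exact le_of_lt h
      · exact le_of_eq h.1
    exact h1.sublist (ofList_sublist _)
  · -- strictly increasing on the right
    have h1 : ((PySem.List.sorted
        (PySem.Set.union (PySem.Set.ofList (tt.map Prod.fst)) (roster.map Prod.fst))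
        (fun k => k) false).filter (fun k => decide (pvF tt roster k ≠ []))).Pairwise
        (fun a b => a ≤ b) :=
      (PySem.List.sorted_pairwise _ _).sublist (List.filter_sublist)
    have h2 : ((PySem.List.sorted
        (PySem.Set.union (PySem.Set.ofList (tt.map Prod.fst)) (roster.map Prod.fst))
        (fun k => k) false).filter (fun k => decide (pvF tt roster k ≠ []))).Pairwise
        (fun a b => a ≠ b) := hR_nodup
    exact (h1.and h2).imp (fun h => lt_of_le_of_ne h.1 h.2)

lemma ports_agree (tt roster : List (String × List String))
    (ht : (tt.map Prod.fst).Nodup) (hr : (roster.map Prod.fst).Nodup) :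
    merge_term_staff_weekday_maps tt roster = merge_term_staff_weekday_maps_alt tt roster := by
  -- shape of A: filter-then-map over the sorted key union
  have hA : merge_term_staff_weekday_maps tt roster
      = ((PySem.List.sorted
          (PySem.Set.union (PySem.Set.ofList (tt.map Prod.fst)) (roster.map Prod.fst))
          (fun k => k) false).filter (fun k => decide (pvF tt roster k ≠ []))).map
          (fun k => (k, PySem.List.sorted (pvF tt roster k) (fun x => x) false)) := by
    simp only [merge_term_staff_weekday_maps, pvF]
    rw [PySem.List.foldl_append_ite
      (p := fun k => PySem.Set.union (PySem.Set.ofList ((PySem.Dict.mk tt).getD k []))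
        ((PySem.Dict.mk roster).getD k []) ≠ [])
      (f := fun k => (k, PySem.List.sorted
        (PySem.Set.union (PySem.Set.ofList ((PySem.Dict.mk tt).getD k []))
          ((PySem.Dict.mk roster).getD k [])) (fun x => x) false))]
    simp
  -- shape of B: its grouping dict, read off as keys and per-key groups
  have hB : merge_term_staff_weekday_maps_alt tt roster
      = (PySem.Set.ofList ((pvSorted tt roster).map Prod.fst)).map
          (fun k => (k, ((pvSorted tt roster).filter (fun p => p.1 == k)).map Prod.snd)) := by
    simp only [merge_term_staff_weekday_maps_alt]
    rw [sorted2_eq_sorted_lex]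
    have hsorted : PySem.List.sorted
        (PySem.Set.ofList ((tt ++ roster).flatMap (fun kv => kv.2.map (fun d => (kv.1, d)))))
        (fun p => toLex p) false = pvSorted tt roster := rfl
    rw [hsorted]
    have hkeys : ((pvSorted tt roster).foldl
        (fun d p => d.modify p.1 [] (fun l => l ++ [p.2]))
        (PySem.Dict.empty : PySem.Dict String (List String))).keys
        = PySem.Set.ofList ((pvSorted tt roster).map Prod.fst) := by
      rw [PySem.Dict.keys_foldl_modify_key (pvSorted tt roster) Prod.fst []
        (fun _ p => (fun l => l ++ [p.2]))]
      rfl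
    have hnodupkeys : ((pvSorted tt roster).foldl
        (fun d p => d.modify p.1 [] (fun l => l ++ [p.2]))
        (PySem.Dict.empty : PySem.Dict String (List String))).keys.Nodup := by
      rw [hkeys]; exact PySem.Set.nodup_ofList _
    rw [PySem.Dict.items_eq_map_keys _ hnodupkeys []]
    rw [hkeys]
    refine List.map_congr_left ?_
    intro k _
    rw [PySem.Dict.getD_foldl_modify_append, PySem.Dict.getD_empty, List.nil_append]
  rw [hA, hB, keys_eq tt roster ht hr]
  refine List.map_congr_left ?_
  intro k _
  rw [values_eq tt roster ht hr k]

-- ===== VERDICT (by name: the statement is the Claim_ definition above) =====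
theorem merge_term_staff_weekday_maps_spec : Claim_equal_merge_term_staff_weekday_maps := by
  intro tt roster _ hpre
  exact ports_agree tt roster hpre.1 hpre.2
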